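-- pv_equiv track=rewrite | github.com/Aka-Ayaan/Homework_02 | Flight_Network/skeleton_graph.py | find_number_of_layovers
-- ===== SOURCE A (Python) =====
-- def getOutgoingNeighbors(G, node):   # Helper Function for getting neighbours of a node
--
--     neighbors = []
--     for edge in G[node]:
--         neighbors.append(edge[0])
--
--     return neighbors
--
-- def DFS_layovers(graph: dict, origin: str, destination: str, route: list, layovers_lst: list):
--
--     # Starting from the origin
--     route.append(origin)
--
--     # Base Case - appends the length of the route list - 2(done for origin and destination)
--     if origin == destination:
--         layovers_lst.append(len(route) - 2)
--
--     # Recursive Case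
--     else:
--         # Recursively calling the function for all the neighbors of the origin
--         for neighbor in getOutgoingNeighbors(graph, origin):
--             if neighbor not in route:
--                 layovers_lst = DFS_layovers(graph, neighbor, destination, route, layovers_lst)
--
--     # Backtracking to empty the route list
--     route.pop()
--
--     return layovers_lst
--
-- def find_number_of_layovers(graph: dict, origin: str, destination: str):
--
--     # Initialization
--     layovers_lst = []
--     route = []
--
--     # Checking if the origin is in the graph
--     if origin not in graph:
--         return None
--
--     # Checking if the destination is in the graph
--     if destination not in graph:
--         return None
--
--     # Checking if the origin and the destination are the same and returns an empty list
--     if destination == origin: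
--         return layovers_lst
--
--     # Calling the DFS function to find the number of layovers for each route
--     layovers_lst = DFS_layovers(graph, origin, destination, route, layovers_lst)
--
--     # Applying Selection Sort to sort the list (.sort() was not working for some reason)
--     for i in range(len(layovers_lst)):
--         min = i
--         for j in range(i+1, len(layovers_lst)):
--             if layovers_lst[j] < layovers_lst[min]:
--                 min = j
--         layovers_lst[i], layovers_lst[min] = layovers_lst[min], layovers_lst[i]
--
--     return layovers_lst
-- ===== SOURCE B (Python) =====
-- def find_number_of_layovers(graph: dict, origin: str, destination: str):
--     if origin not in graph:
--         return None
--     if destination not in graph: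
--         return None
--     if destination == origin:
--         return []
--     results = []
--     stack = [(origin, [origin])]
--     while stack:
--         node, path = stack.pop()
--         if node == destination:
--             results.append(len(path) - 2)
--         else:
--             for edge in reversed(graph[node]):
--                 nbr = edge[0]
--                 if nbr not in path:
--                     stack.append((nbr, path + [nbr]))
--     return sorted(results)
-- ===== Notes on version B (the rewrite author's own statement) =====
-- stated objective: alternative
-- what changed: Replaces the recursive backtracking DFS with shared route list and hand-written selection sort by an iterative explicit-stack traversal carrying an independent path per entry, with the built-in sorted() on the result.
-- outside the precondition, e.g. on find_number_of_layovers({'A': [], 'B': [('X', 1)]}, 'A', 'B'): A returns [], B returns []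
import Mathlib
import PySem

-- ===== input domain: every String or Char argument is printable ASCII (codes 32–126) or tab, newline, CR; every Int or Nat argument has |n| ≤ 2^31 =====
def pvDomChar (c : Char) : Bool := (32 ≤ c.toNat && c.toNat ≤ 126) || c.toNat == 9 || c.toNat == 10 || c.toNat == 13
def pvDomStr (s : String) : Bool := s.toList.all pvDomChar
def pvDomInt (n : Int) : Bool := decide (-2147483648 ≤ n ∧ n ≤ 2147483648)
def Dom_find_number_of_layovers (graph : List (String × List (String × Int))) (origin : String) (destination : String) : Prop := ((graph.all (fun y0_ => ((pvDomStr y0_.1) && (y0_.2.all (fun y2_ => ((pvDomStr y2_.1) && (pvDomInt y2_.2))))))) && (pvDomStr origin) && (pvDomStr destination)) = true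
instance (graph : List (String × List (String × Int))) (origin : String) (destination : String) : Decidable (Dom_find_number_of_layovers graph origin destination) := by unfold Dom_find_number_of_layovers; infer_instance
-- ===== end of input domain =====

-- B replaces the recursive backtracking DFS + hand-written selection sort of A by an
-- iterative explicit-stack traversal (independent path per stack entry) + built-in sorted().
-- (A mutates its `route`/`layovers_lst` arguments only inside its own helper; the public
-- function mutates nothing the caller passes.)

-- ===== PORT A =====
-- dict lookup on the association list: first match (Python dict keys are unique)
def pvLookup (g : List (String × List (String × Int))) (k : String) : Option (List (String × Int)) :=
  (g.find? (fun p => p.1 == k)).map (·.2)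

-- getOutgoingNeighbors, given G[node] (the KeyError of G[node] is handled at the call site)
def pvOutgoing (edges : List (String × Int)) : List String :=
  edges.foldl (fun ns e => ns ++ [e.1]) []

-- DFS_layovers; `acc` is the threaded layovers_lst, `route ++ [node]` is the route after
-- route.append(origin) (the final route.pop() restores the caller's route, so route is passed
-- by value here).  The Nat argument is fuel, a pure totality guard: with the initial fuel
-- graph.length + 1 it never runs out on inputs satisfying Pre_ (the route is duplicate-free
-- and stays inside the keys of graph).  A missing key (Python KeyError) yields the `none`
-- branch, which Pre_ excludes.
def pvDfsA (g : List (String × List (String × Int))) (dest : String) :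
    Nat → String → List String → List Int → List Int
  | 0, _, _, acc => acc
  | fuel+1, node, route, acc =>
    let route' := route ++ [node]
    if node = dest then acc ++ [(route'.length : Int) - 2]
    else
      match pvLookup g node with
      | none => acc
      | some edges =>
        (pvOutgoing edges).foldl
          (fun a nbr => if nbr ∈ route' then a else pvDfsA g dest fuel nbr route' a) acc

-- the selection sort of A, literal (indices are always in range, so the getD default 0 is never used)
def pvSelSort (l0 : List Int) : List Int :=
  (List.range l0.length).foldl
    (fun l i =>
      let m := (List.range' (i+1) (l.length - (i+1))).foldl
        (fun m j => if l.getD j 0 < l.getD m 0 then j else m) i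
      let a := l.getD i 0
      let b := l.getD m 0
      (l.set i b).set m a)
    l0

def find_number_of_layovers (graph : List (String × List (String × Int))) (origin : String) (destination : String) : Option (List Int) :=
  if !(graph.any (fun p => p.1 == origin)) then none
  else if !(graph.any (fun p => p.1 == destination)) then none
  else if destination == origin then some []
  else some (pvSelSort (pvDfsA graph destination (graph.length + 1) origin [] []))

-- ===== PORT B =====
-- the while-loop over the explicit stack (head of the list = top of the stack); the Nat
-- argument is fuel, a pure totality guard: pvFuel below always suffices on inputs
-- satisfying Pre_.  A missing key (Python KeyError) yields the `none` branch, excluded by Pre_.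
def pvStackRun (g : List (String × List (String × Int))) (dest : String) :
    Nat → List (String × List String) → List Int → List Int
  | 0, _, res => res
  | _+1, [], res => res
  | fuel+1, (node, path) :: rest, res =>
    if node = dest then pvStackRun g dest fuel rest (res ++ [(path.length : Int) - 2])
    else
      match pvLookup g node with
      | none => res
      | some edges =>
        pvStackRun g dest fuel
          (edges.reverse.foldl
            (fun st e => if e.1 ∈ path then st else (e.1, path ++ [e.1]) :: st) rest)
          res

def pvMaxDeg (g : List (String × List (String × Int))) : Nat :=
  g.foldl (fun m p => max m p.2.length) 0

def pvFuel (g : List (String × List (String × Int))) : Nat :=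
  (pvMaxDeg g + 2) ^ (g.length + 1)

def find_number_of_layovers_alt (graph : List (String × List (String × Int))) (origin : String) (destination : String) : Option (List Int) :=
  if !(graph.any (fun p => p.1 == origin)) then none
  else if !(graph.any (fun p => p.1 == destination)) then none
  else if destination == origin then some []
  else some (PySem.List.sorted
    (pvStackRun graph destination (pvFuel graph) [(origin, [origin])] [])
    (fun x => x) false)

-- ===== PRECONDITION & SPEC =====
-- Pre_ excludes graphs that contain an edge to a node that is neither a key of the graph nor
-- the destination (unless a guard returns early): on such graphs the DFS may reach that node
-- and raise KeyError.  (On some of them the bad node is unreachable and A still returns; both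
-- programs behave identically there too, but the closed-form condition is this closure.)
def Pre_find_number_of_layovers (graph : List (String × List (String × Int))) (origin : String) (destination : String) : Prop :=
  (!(graph.any (fun p => p.1 == origin)) || !(graph.any (fun p => p.1 == destination)) || (destination == origin)
    || graph.all (fun p => p.2.all (fun e => e.1 == destination || graph.any (fun q => q.1 == e.1)))) = true
instance (graph : List (String × List (String × Int))) (origin : String) (destination : String) : Decidable (Pre_find_number_of_layovers graph origin destination) := by unfold Pre_find_number_of_layovers; infer_instance

def pvWitness_find_number_of_layovers : (List (String × List (String × Int))) × String × String :=
  ([("A", [("B", 1)]), ("B", [])], "A", "B")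

def Spec_find_number_of_layovers (graph : List (String × List (String × Int))) (origin : String) (destination : String) (out : Option (List Int)) : Prop := out = find_number_of_layovers_alt graph origin destination
instance (graph : List (String × List (String × Int))) (origin : String) (destination : String) (out : Option (List Int)) : Decidable (Spec_find_number_of_layovers graph origin destination out) := by unfold Spec_find_number_of_layovers; infer_instance

-- ===== CLAIM (what is proved, stated in full; the proofs are below) =====
def Claim_equal_find_number_of_layovers : Prop := ∀ (graph : List (String × List (String × Int))) (origin : String) (destination : String), Dom_find_number_of_layovers graph origin destination → Pre_find_number_of_layovers graph origin destination → Spec_find_number_of_layovers graph origin destination (find_number_of_layovers graph origin destination)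

-- ===== LEMMAS AND PROOFS =====

-- x is a key of g
def pvKeyIn (g : List (String × List (String × Int))) (x : String) : Prop :=
  g.any (fun q => q.1 == x) = true

-- the closure condition of Pre_ in Prop form
def pvClosed (g : List (String × List (String × Int))) (d : String) : Prop :=
  ∀ p ∈ g, ∀ e ∈ p.2, e.1 = d ∨ pvKeyIn g e.1

-- weight of a stack entry's path, and of a whole stack (fuel accounting for pvStackRun)
def pvW (g : List (String × List (String × Int))) (p : List String) : Nat :=
  (pvMaxDeg g + 2) ^ (g.length + 1 - p.length)
def pvS (g : List (String × List (String × Int))) (st : List (String × List String)) : Nat :=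
  (st.map (fun e => pvW g e.2)).sum

-- what a stack entry contributes: A's DFS from its node, with the rest of its path as route
def pvContrib (g : List (String × List (String × Int))) (d : String) (e : String × List String) : List Int :=
  pvDfsA g d (g.length + 2 - e.2.length) e.1 e.2.dropLast []

-- well-formed stack entry: the path ends in the node, is duplicate-free, and stays in the keys
def pvWf (g : List (String × List (String × Int))) (e : String × List String) : Prop :=
  (∃ r, e.2 = r ++ [e.1]) ∧ e.2.Nodup ∧ ∀ x ∈ e.2, pvKeyIn g x

lemma pvKeyIn_iff (g : List (String × List (String × Int))) (x : String) :
    pvKeyIn g x ↔ x ∈ g.map Prod.fst := by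
  unfold pvKeyIn
  rw [List.any_eq_true]
  constructor
  · rintro ⟨q, hq, h⟩; exact List.mem_map.2 ⟨q, hq, by simpa using h⟩
  · rintro h
    rcases List.mem_map.1 h with ⟨q, hq, rfl⟩
    exact ⟨q, hq, by simp⟩

lemma pvLookup_mem (g : List (String × List (String × Int))) (x : String)
    (h : pvKeyIn g x) : ∃ edges, pvLookup g x = some edges ∧ (x, edges) ∈ g := by
  unfold pvKeyIn at h
  have hs : (g.find? (fun p => p.1 == x)).isSome := by
    rw [List.find?_isSome]
    rcases List.any_eq_true.1 h with ⟨q, hq, hqx⟩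
    exact ⟨q, hq, hqx⟩
  rcases Option.isSome_iff_exists.1 hs with ⟨q, hq⟩
  have hqx : q.1 = x := by simpa using List.find?_some hq
  have hmem : q ∈ g := List.mem_of_find?_eq_some hq
  refine ⟨q.2, ?_, ?_⟩
  · simp [pvLookup, hq]
  · rw [← hqx]; exact hmem

lemma pv_length_le (g : List (String × List (String × Int))) (p : List String)
    (hnd : p.Nodup) (hk : ∀ x ∈ p, pvKeyIn g x) : p.length ≤ g.length := by
  have h1 : p.toFinset.card = p.length := List.toFinset_card_of_nodup hnd
  have hsub : p.toFinset ⊆ (g.map Prod.fst).toFinset := by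
    intro x hx
    rw [List.mem_toFinset] at hx ⊢
    exact (pvKeyIn_iff g x).1 (hk x hx)
  calc p.length = p.toFinset.card := h1.symm
    _ ≤ (g.map Prod.fst).toFinset.card := Finset.card_le_card hsub
    _ ≤ (g.map Prod.fst).length := (g.map Prod.fst).toFinset_card_le
    _ = g.length := List.length_map ..

lemma pv_dfs_acc (g : List (String × List (String × Int))) (d : String) :
    ∀ (f : Nat) (node : String) (route : List String) (acc : List Int),
      pvDfsA g d f node route acc = acc ++ pvDfsA g d f node route [] := by
  intro f
  induction f with
  | zero => intro node route acc; simp [pvDfsA]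
  | succ f ih =>
    intro node route acc
    simp only [pvDfsA]
    by_cases hnd : node = d
    · simp [hnd]
    · simp only [if_neg hnd]
      cases hL : pvLookup g node with
      | none => simp
      | some edges =>
        simp only []
        have aux : ∀ (xs : List String) (a : List Int),
            xs.foldl (fun a nbr => if nbr ∈ route ++ [node] then a else pvDfsA g d f nbr (route ++ [node]) a) a
            = a ++ xs.foldl (fun a nbr => if nbr ∈ route ++ [node] then a else pvDfsA g d f nbr (route ++ [node]) a) [] := by
          intro xs
          induction xs with
          | nil => intro a; simp
          | cons x xs ihx =>
            intro a
            simp only [List.foldl_cons]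
            by_cases hx : x ∈ route ++ [node]
            · simp only [if_pos hx]
              rw [ihx a]
            · simp only [if_neg hx]
              rw [ihx (pvDfsA g d f x (route ++ [node]) a),
                  ihx (pvDfsA g d f x (route ++ [node]) []),
                  ih x (route ++ [node]) a, List.append_assoc]
        exact aux (pvOutgoing edges) acc

lemma pv_flatMap_ite (l : List String) (p : List String) (h : String → List Int) :
    l.flatMap (fun x => if x ∈ p then [] else h x)
      = (l.filter (fun t => !decide (t ∈ p))).flatMap h := by
  induction l with
  | nil => rfl
  | cons x xs ih => by_cases hx : x ∈ p <;> simp [hx, ih]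

lemma pv_dfs_succ (g : List (String × List (String × Int))) (d : String)
    (f : Nat) (node : String) (route : List String) (edges : List (String × Int))
    (hne : node ≠ d) (hL : pvLookup g node = some edges) :
    pvDfsA g d (f+1) node route []
      = ((edges.map Prod.fst).filter (fun t => !decide (t ∈ route ++ [node]))).flatMap
          (fun nbr => pvDfsA g d f nbr (route ++ [node]) []) := by
  simp only [pvDfsA, if_neg hne, hL]
  have hout : pvOutgoing edges = edges.map Prod.fst := by
    unfold pvOutgoing
    rw [PySem.List.foldl_append_singleton_eq_map]
    exact List.nil_append _
  rw [hout]
  have hstep : (fun (a : List Int) (nbr : String) =>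
        if nbr ∈ route ++ [node] then a else pvDfsA g d f nbr (route ++ [node]) a)
      = (fun a nbr => a ++ (if nbr ∈ route ++ [node] then [] else pvDfsA g d f nbr (route ++ [node]) [])) := by
    funext a nbr
    by_cases h : nbr ∈ route ++ [node]
    · simp [h]
    · simp only [if_neg h]
      exact pv_dfs_acc g d f nbr (route ++ [node]) a
  rw [hstep, PySem.List.foldl_append_eq_flatMap]
  rw [List.nil_append, pv_flatMap_ite]

lemma pv_foldl_max_init_le : ∀ (g : List (String × List (String × Int))) (m : Nat),
    m ≤ g.foldl (fun m p => max m p.2.length) m := by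
  intro g
  induction g with
  | nil => intro m; simp
  | cons q g ih =>
    intro m
    simp only [List.foldl_cons]
    exact le_trans (Nat.le_max_left _ _) (ih _)

lemma pv_foldl_max_le : ∀ (g : List (String × List (String × Int))) (m : Nat)
    (p : String × List (String × Int)), p ∈ g →
    p.2.length ≤ g.foldl (fun m p => max m p.2.length) m := by
  intro g
  induction g with
  | nil => intro m p hp; simp at hp
  | cons q g ih =>
    intro m p hp
    simp only [List.foldl_cons]
    rcases List.mem_cons.1 hp with rfl | hp
    · exact le_trans (Nat.le_max_right _ _) (pv_foldl_max_init_le g _)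
    · exact ih _ p hp

lemma pv_edges_le_maxDeg (g : List (String × List (String × Int)))
    (node : String) (edges : List (String × Int)) (h : (node, edges) ∈ g) :
    edges.length ≤ pvMaxDeg g :=
  pv_foldl_max_le g 0 (node, edges) h

lemma pv_push_foldl (p : List String) :
    ∀ (edges : List (String × Int)) (rest : List (String × List String)),
      edges.reverse.foldl (fun st e => if e.1 ∈ p then st else (e.1, p ++ [e.1]) :: st) rest
        = (((edges.map Prod.fst).filter (fun t => !decide (t ∈ p))).map
            (fun nbr => (nbr, p ++ [nbr]))) ++ rest := by
  intro edges
  induction edges with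
  | nil => intro rest; simp
  | cons e es ih =>
    intro rest
    simp only [List.reverse_cons, List.foldl_append, List.foldl_cons, List.foldl_nil,
      List.map_cons, List.filter_cons]
    rw [ih]
    by_cases he : e.1 ∈ p
    · simp [he]
    · simp [he]

lemma pv_arith (a c s f x : Nat) (h1 : a + 2*x ≤ c) (h2 : c + s ≤ f + 1) (h3 : 1 ≤ x) :
    a + s ≤ f := by omega

theorem pv_stack_run (g : List (String × List (String × Int))) (d : String)
    (hcl : pvClosed g d) (hd : pvKeyIn g d) :
    ∀ (fuel : Nat) (st : List (String × List String)) (res : List Int),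
      (∀ e ∈ st, pvWf g e) → pvS g st ≤ fuel →
      pvStackRun g d fuel st res = res ++ st.flatMap (pvContrib g d) := by
  intro fuel
  induction fuel with
  | zero =>
    intro st res hwf hS
    cases st with
    | nil => simp [pvStackRun]
    | cons e rest =>
      exfalso
      have h1 : 1 ≤ pvW g e.2 := Nat.one_le_pow _ _ (by omega)
      have : pvS g (e :: rest) = pvW g e.2 + pvS g rest := by
        simp [pvS]
      omega
  | succ f ih =>
    intro st res hwf hS
    cases st with
    | nil => simp [pvStackRun]
    | cons e rest =>
      obtain ⟨node, path⟩ := e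
      obtain ⟨⟨r, hr⟩, hnd, hkeys⟩ := hwf (node, path) List.mem_cons_self
      replace hr : path = r ++ [node] := hr
      replace hnd : path.Nodup := hnd
      replace hkeys : ∀ x ∈ path, pvKeyIn g x := hkeys
      have hwfrest : ∀ e ∈ rest, pvWf g e := fun e he => hwf e (List.mem_cons_of_mem _ he)
      have hLlen : path.length ≤ g.length := pv_length_le g path hnd hkeys
      have hpos : 1 ≤ path.length := by rw [hr]; simp
      have hSsplit : pvS g ((node, path) :: rest) = pvW g path + pvS g rest := by simp [pvS]
      by_cases hnode : node = d
      · simp only [pvStackRun, if_pos hnode]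
        have h1 : 1 ≤ pvW g path := Nat.one_le_pow _ _ (by omega)
        rw [ih rest _ hwfrest (by omega)]
        have hc : pvContrib g d (node, path) = [(path.length : Int) - 2] := by
          unfold pvContrib
          dsimp only
          have h2 : g.length + 2 - path.length = (g.length + 1 - path.length) + 1 := by omega
          rw [h2]
          simp only [pvDfsA]
          rw [hr]
          simp [hnode]
        simp [hc]
      · have hkn : pvKeyIn g node := hkeys node (by rw [hr]; simp)
        obtain ⟨edges, hL, hmem⟩ := pvLookup_mem g node hkn
        simp only [pvStackRun, if_neg hnode, hL]
        rw [pv_push_foldl]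
        have hkidwf : ∀ e ∈ (((edges.map Prod.fst).filter (fun t => !decide (t ∈ path))).map
            (fun nbr => (nbr, path ++ [nbr]))), pvWf g e := by
          intro e he
          rcases List.mem_map.1 he with ⟨nbr, hnbr, rfl⟩
          have hmemn : nbr ∈ edges.map Prod.fst := List.mem_of_mem_filter hnbr
          have hnotp : ¬ (nbr ∈ path) := by
            have := List.of_mem_filter hnbr
            simpa using this
          refine ⟨⟨path, rfl⟩, ?_, ?_⟩
          · rw [List.nodup_append]
            refine ⟨hnd, List.nodup_singleton _, ?_⟩
            intro a ha b hb heq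
            subst heq
            exact hnotp ((List.mem_singleton.1 hb) ▸ ha)
          · intro x hx
            rcases List.mem_append.1 hx with hx | hx
            · exact hkeys x hx
            · have hxn : x = nbr := by simpa using hx
              subst hxn
              rcases List.mem_map.1 hmemn with ⟨ed, hed, rfl⟩
              rcases hcl (node, edges) hmem ed hed with h | h
              · rw [h]; exact hd
              · exact h
        have hwfall : ∀ e ∈ (((edges.map Prod.fst).filter (fun t => !decide (t ∈ path))).map
            (fun nbr => (nbr, path ++ [nbr]))) ++ rest, pvWf g e := by
          intro e he
          rcases List.mem_append.1 he with he | he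
          · exact hkidwf e he
          · exact hwfrest e he
        -- fuel accounting
        have hSkids : pvS g (((edges.map Prod.fst).filter (fun t => !decide (t ∈ path))).map
            (fun nbr => (nbr, path ++ [nbr])))
            = ((edges.map Prod.fst).filter (fun t => !decide (t ∈ path))).length
              * (pvMaxDeg g + 2) ^ (g.length - path.length) := by
          unfold pvS
          rw [List.map_map]
          have : ((fun e => pvW g e.2) ∘ fun nbr => (nbr, path ++ [nbr]))
              = fun _ => (pvMaxDeg g + 2) ^ (g.length - path.length) := by
            funext x
            show pvW g (path ++ [x]) = _
            unfold pvW
            rw [show (path ++ [x]).length = path.length + 1 from by simp]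
            congr 1
            omega
          rw [this, List.map_const', List.sum_replicate, smul_eq_mul]
        have hklen : ((edges.map Prod.fst).filter (fun t => !decide (t ∈ path))).length
            ≤ pvMaxDeg g := by
          calc _ ≤ (edges.map Prod.fst).length := List.length_filter_le _ _
            _ = edges.length := List.length_map ..
            _ ≤ pvMaxDeg g := pv_edges_le_maxDeg g node edges hmem
        have hx1 : 1 ≤ (pvMaxDeg g + 2) ^ (g.length - path.length) :=
          Nat.one_le_pow _ _ (by omega)
        have hWpath : pvW g path
            = (pvMaxDeg g + 2) * (pvMaxDeg g + 2) ^ (g.length - path.length) := by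
          unfold pvW
          rw [show g.length + 1 - path.length = (g.length - path.length) + 1 by omega, pow_succ]
          ring
        have hSnew : pvS g ((((edges.map Prod.fst).filter (fun t => !decide (t ∈ path))).map
            (fun nbr => (nbr, path ++ [nbr]))) ++ rest) ≤ f := by
          have hsplit : pvS g ((((edges.map Prod.fst).filter (fun t => !decide (t ∈ path))).map
              (fun nbr => (nbr, path ++ [nbr]))) ++ rest)
              = pvS g (((edges.map Prod.fst).filter (fun t => !decide (t ∈ path))).map
                (fun nbr => (nbr, path ++ [nbr]))) + pvS g rest := by
            simp [pvS]
          rw [hsplit, hSkids]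
          refine pv_arith _ ((pvMaxDeg g + 2) * (pvMaxDeg g + 2) ^ (g.length - path.length))
            _ _ _ ?_ ?_ hx1
          · have := Nat.mul_le_mul_right ((pvMaxDeg g + 2) ^ (g.length - path.length))
              (show ((edges.map Prod.fst).filter (fun t => !decide (t ∈ path))).length + 2
                ≤ pvMaxDeg g + 2 by omega)
            calc _ = (((edges.map Prod.fst).filter (fun t => !decide (t ∈ path))).length + 2)
                  * (pvMaxDeg g + 2) ^ (g.length - path.length) := by ring
              _ ≤ _ := this
          · rw [← hWpath]; omega
        rw [ih _ res hwfall hSnew]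
        have hc : pvContrib g d (node, path)
            = (((edges.map Prod.fst).filter (fun t => !decide (t ∈ path))).map
                (fun nbr => (nbr, path ++ [nbr]))).flatMap (pvContrib g d) := by
          unfold pvContrib
          dsimp only
          have h2 : g.length + 2 - path.length = (g.length + 1 - path.length) + 1 := by omega
          have hdrop : path.dropLast = r := by rw [hr]; exact List.dropLast_concat ..
          rw [h2, hdrop, pv_dfs_succ g d _ node r edges hnode hL, ← hr, List.flatMap_map]
          congr 1
          funext nbr
          dsimp only
          rw [List.dropLast_concat, show (path ++ [nbr]).length = path.length + 1 from by simp,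
            show g.length + 2 - (path.length + 1) = g.length + 1 - path.length from by omega]
        rw [List.flatMap_append, List.flatMap_cons, ← hc]

-- ===== selection sort =====

def pvSelStep (l : List Int) (i : Nat) : List Int :=
  let m := (List.range' (i+1) (l.length - (i+1))).foldl
    (fun m j => if l.getD j 0 < l.getD m 0 then j else m) i
  let a := l.getD i 0
  let b := l.getD m 0
  (l.set i b).set m a

lemma pvSelSort_eq_foldl (l0 : List Int) :
    pvSelSort l0 = (List.range l0.length).foldl pvSelStep l0 := rfl

lemma pv_argmin (l : List Int) : ∀ (js : List Nat) (m0 : Nat),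
    ((js.foldl (fun m j => if l.getD j 0 < l.getD m 0 then j else m) m0) = m0
      ∨ (js.foldl (fun m j => if l.getD j 0 < l.getD m 0 then j else m) m0) ∈ js)
    ∧ l.getD (js.foldl (fun m j => if l.getD j 0 < l.getD m 0 then j else m) m0) 0 ≤ l.getD m0 0
    ∧ ∀ j ∈ js, l.getD (js.foldl (fun m j => if l.getD j 0 < l.getD m 0 then j else m) m0) 0 ≤ l.getD j 0 := by
  intro js
  induction js with
  | nil => intro m0; exact ⟨Or.inl rfl, le_refl _, by simp⟩
  | cons j js ihj =>
    intro m0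
    simp only [List.foldl_cons]
    obtain ⟨hmem, hle, hall⟩ := ihj (if l.getD j 0 < l.getD m0 0 then j else m0)
    by_cases hj : l.getD j 0 < l.getD m0 0
    · rw [if_pos hj] at hmem hle hall ⊢
      refine ⟨?_, le_trans hle (le_of_lt hj), ?_⟩
      · rcases hmem with h | h
        · exact Or.inr (by rw [h]; exact List.mem_cons_self)
        · exact Or.inr (List.mem_cons_of_mem _ h)
      · intro j' hj'
        rcases List.mem_cons.1 hj' with rfl | hj'
        · exact hle
        · exact hall j' hj'
    · rw [if_neg hj] at hmem hle hall ⊢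
      refine ⟨?_, hle, ?_⟩
      · rcases hmem with h | h
        · exact Or.inl h
        · exact Or.inr (List.mem_cons_of_mem _ h)
      · intro j' hj'
        rcases List.mem_cons.1 hj' with rfl | hj'
        · exact le_trans hle (not_lt.1 hj)
        · exact hall j' hj'

def pvInv (n : Nat) (l0 l : List Int) (i : Nat) : Prop :=
  l.length = n ∧ l.Perm l0 ∧ ∀ a b : Nat, a < i → a ≤ b → b < n → l.getD a 0 ≤ l.getD b 0

lemma pv_perm_aux : ∀ (l : List Int) (k : Nat) (x : Int), k < l.length →
    (l.getD k 0 :: l.set k x).Perm (x :: l) := by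
  intro l
  induction l with
  | nil => intro k x h; simp at h
  | cons y t ih =>
    intro k x h
    cases k with
    | zero =>
      simp only [List.getD_cons_zero, List.set_cons_zero]
      exact List.Perm.swap x y t
    | succ k =>
      have hk : k < t.length := by simpa using h
      simp only [List.getD_cons_succ, List.set_cons_succ]
      exact ((List.Perm.swap y (t.getD k 0) (t.set k x)).trans
        ((ih k x hk).cons y)).trans (List.Perm.swap x y t)

lemma pv_swap_perm_lt : ∀ (l : List Int) (i m : Nat), i < m → m < l.length →
    ((l.set i (l.getD m 0)).set m (l.getD i 0)).Perm l := by
  intro l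
  induction l with
  | nil => intro i m him hm; simp at hm
  | cons y t ih =>
    intro i m him hm
    cases i with
    | zero =>
      cases m with
      | zero => omega
      | succ k =>
        have hk : k < t.length := by simpa using hm
        simp only [List.getD_cons_succ, List.getD_cons_zero, List.set_cons_zero,
          List.set_cons_succ]
        exact pv_perm_aux t k y hk
    | succ i' =>
      cases m with
      | zero => omega
      | succ k =>
        have hk : k < t.length := by simpa using hm
        simp only [List.getD_cons_succ, List.set_cons_succ]
        exact (ih i' k (by omega) hk).cons y

lemma pv_set_self (l : List Int) (i : Nat) (hi : i < l.length) :
    l.set i (l.getD i 0) = l := by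
  apply List.ext_getElem
  · simp
  · intro k h1 h2
    rw [List.getElem_set]
    split
    · next h => subst h; exact List.getD_eq_getElem _ _ hi
    · rfl

lemma pv_swap_perm (l : List Int) (i m : Nat) (hi : i < l.length) (hm : m < l.length) :
    ((l.set i (l.getD m 0)).set m (l.getD i 0)).Perm l := by
  rcases lt_trichotomy i m with h | rfl | h
  · exact pv_swap_perm_lt l i m h hm
  · rw [List.set_set, pv_set_self l i hi]
  · rw [List.set_comm _ _ (by omega : i ≠ m)]
    exact pv_swap_perm_lt l m i h hi

lemma pv_sel_step_inv (n : Nat) (l0 l : List Int) (i : Nat) (hi : i < n)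
    (hinv : pvInv n l0 l i) : pvInv n l0 (pvSelStep l i) (i+1) := by
  obtain ⟨hlen, hperm, hord⟩ := hinv
  unfold pvSelStep
  set js := List.range' (i+1) (l.length - (i+1)) with hjs
  obtain ⟨hmem, hle0, hall⟩ := pv_argmin l js i
  set m := js.foldl (fun m j => if l.getD j 0 < l.getD m 0 then j else m) i with hm
  have hmrange : i ≤ m ∧ m < n := by
    rcases hmem with h | h
    · omega
    · rw [hjs] at h
      have := List.mem_range'_1.1 h
      omega
  have hmin : ∀ j, i ≤ j → j < n → l.getD m 0 ≤ l.getD j 0 := by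
    intro j hij hjn
    rcases eq_or_lt_of_le hij with rfl | hlt
    · exact hle0
    · apply hall
      rw [hjs]
      exact List.mem_range'_1.2 ⟨hlt, by omega⟩
  have hil : i < l.length := by omega
  have hml : m < l.length := by omega
  have hget : ∀ c : Nat, c < n →
      ((l.set i (l.getD m 0)).set m (l.getD i 0)).getD c 0
        = if c = m then l.getD i 0 else if c = i then l.getD m 0 else l.getD c 0 := by
    intro c hc
    have hcl : c < l.length := by omega
    have hc2 : c < ((l.set i (l.getD m 0)).set m (l.getD i 0)).length := by
      simpa using hcl
    rw [List.getD_eq_getElem _ _ hc2, List.getElem_set, List.getElem_set]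
    by_cases hcm : c = m
    · rw [if_pos hcm, if_pos (by omega : m = c)]
    · rw [if_neg (by omega : ¬ (m = c)), if_neg hcm]
      by_cases hci : c = i
      · rw [if_pos hci, if_pos (by omega : i = c), List.getD_eq_getElem _ _ hml]
      · rw [if_neg (by omega : ¬ (i = c)), if_neg hci, List.getD_eq_getElem _ _ hcl]
  refine ⟨by simpa using hlen, (pv_swap_perm l i m hil hml).trans hperm, ?_⟩
  intro a b ha hab hb
  have han : a < n := by omega
  rw [hget a han, hget b hb]
  by_cases ham : a = m
  · rw [if_pos ham]
    have hmi : m = i := by omega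
    by_cases hbm : b = m
    · rw [if_pos hbm]
    · rw [if_neg hbm]
      by_cases hbi : b = i
      · rw [if_pos hbi, hmi]
      · rw [if_neg hbi]
        have h2 : l.getD m 0 ≤ l.getD b 0 := hmin b (by omega) hb
        rw [← hmi]
        exact h2
  · rw [if_neg ham]
    by_cases hai : a = i
    · rw [if_pos hai]
      by_cases hbm : b = m
      · rw [if_pos hbm]
        exact hmin i (le_refl i) (by omega)
      · rw [if_neg hbm]
        by_cases hbi : b = i
        · rw [if_pos hbi]
        · rw [if_neg hbi]
          exact hmin b (by omega) hb
    · have halt : a < i := by omega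
      rw [if_neg hai]
      by_cases hbm : b = m
      · rw [if_pos hbm]
        exact hord a i halt (by omega) (by omega)
      · rw [if_neg hbm]
        by_cases hbi : b = i
        · rw [if_pos hbi]
          exact hord a m halt (by omega) (by omega)
        · rw [if_neg hbi]
          exact hord a b halt hab hb

lemma pv_sel_loop (n : Nat) (l0 : List Int) :
    ∀ (k i : Nat) (l : List Int), i + k = n → pvInv n l0 l i →
      pvInv n l0 ((List.range' i k).foldl pvSelStep l) (i + k) := by
  intro k
  induction k with
  | zero => intro i l h hinv; simpa using hinv
  | succ k ih =>
    intro i l h hinv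
    rw [List.range'_succ, List.foldl_cons]
    have hi : i < n := by omega
    have h2 := pv_sel_step_inv n l0 l i hi hinv
    have h3 := ih (i+1) (pvSelStep l i) (by omega) h2
    have he : i + (k+1) = (i+1) + k := by omega
    rw [he]
    exact h3

lemma pv_selSort_eq_sorted (l : List Int) :
    pvSelSort l = PySem.List.sorted l (fun x => x) false := by
  have h0 : pvInv l.length l l 0 :=
    ⟨rfl, List.Perm.refl l, by intro a b ha hab hb; exact absurd ha (Nat.not_lt_zero a)⟩
  have hloop := pv_sel_loop l.length l l.length 0 l (by omega) h0
  rw [zero_add] at hloop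
  obtain ⟨hlen, hperm, hord⟩ := hloop
  have hpw : ((List.range' 0 l.length).foldl pvSelStep l).Pairwise (· ≤ ·) := by
    rw [List.pairwise_iff_getElem]
    intro p q hp hq hpq
    have hp' : p < l.length := by omega
    have hq' : q < l.length := by omega
    have := hord p q hp' (by omega) hq'
    rwa [List.getD_eq_getElem _ _ hp, List.getD_eq_getElem _ _ hq] at this
  rw [pvSelSort_eq_foldl, List.range_eq_range']
  exact (PySem.List.sorted_id_eq_of_perm_of_pairwise _ _ hperm hpw).symm

-- ===== VERDICT (by name: the statement is the Claim_ definition above) =====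
theorem find_number_of_layovers_spec : Claim_equal_find_number_of_layovers := by
  intro g o d hdom hpre
  unfold Spec_find_number_of_layovers
  unfold find_number_of_layovers find_number_of_layovers_alt
  cases ho : g.any (fun p => p.1 == o) with
  | false => simp
  | true =>
    cases hdk : g.any (fun p => p.1 == d) with
    | false => simp
    | true =>
      by_cases hod : d = o
      · simp [hod]
      · have hodb : (d == o) = false := by simpa using hod
        simp only [hodb, Bool.not_true, Bool.false_eq_true, if_false]
        have hcl : pvClosed g d := by
          unfold Pre_find_number_of_layovers at hpre
          rw [ho, hdk, hodb] at hpre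
          simp only [Bool.not_true, Bool.false_or, Bool.or_false] at hpre
          intro p hp e he
          have h1 := List.all_eq_true.1 hpre p hp
          have h2 := List.all_eq_true.1 h1 e he
          rcases Bool.or_eq_true_iff.1 h2 with h | h
          · left; simpa using h
          · right; exact h
        have hdK : pvKeyIn g d := hdk
        have hwf1 : ∀ e ∈ ([(o, [o])] : List (String × List String)), pvWf g e := by
          intro e he
          have heo : e = (o, [o]) := by simpa using he
          subst heo
          refine ⟨⟨[], rfl⟩, by simp, ?_⟩
          intro x hx
          have hxo : x = o := by simpa using hx
          subst hxo
          exact ho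
        have hb1 : pvS g [(o, [o])] ≤ pvFuel g := by
          simp only [pvS, pvW, pvFuel, List.map_cons, List.map_nil, List.sum_cons,
            List.sum_nil, List.length_cons, List.length_nil, Nat.add_zero]
          exact Nat.pow_le_pow_right (by omega) (by omega)
        have hrun : pvStackRun g d (pvFuel g) [(o, [o])] []
            = pvDfsA g d (g.length + 1) o [] [] := by
          rw [pv_stack_run g d hcl hdK (pvFuel g) [(o, [o])] [] hwf1 hb1]
          simp only [List.flatMap_cons, List.flatMap_nil, List.append_nil, List.nil_append]
          unfold pvContrib
          dsimp only
          rw [show ([o] : List String).dropLast = [] from rfl,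
            show ([o] : List String).length = 1 from rfl,
            show g.length + 2 - 1 = g.length + 1 from by omega]
        rw [hrun, pv_selSort_eq_sorted]
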